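-- pv_equiv track=rewrite | github.com/learn-ukrainian/learn-ukrainian.github.io | scripts/wiki/diagnostics/corpus_gaps/audit.py | build_presence_breakdown
-- ===== SOURCE A (Python) =====
-- from typing import Any
--
-- def build_presence_breakdown(coverage_map: dict[str, Any]) -> dict[str, int]:
--     counts = {
--         "textbooks_and_external": 0,
--         "textbooks_only": 0,
--         "external_only": 0,
--         "absent_from_both": 0,
--     }
--     for article in coverage_map.get("articles", []):
--         for concept in article.get("concepts", []):
--             in_textbooks = bool(concept.get("in_textbooks"))
--             in_external = bool(concept.get("in_external"))
--             if in_textbooks and in_external: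
--                 counts["textbooks_and_external"] += 1
--             elif in_textbooks:
--                 counts["textbooks_only"] += 1
--             elif in_external:
--                 counts["external_only"] += 1
--             else:
--                 counts["absent_from_both"] += 1
--     return counts
-- ===== SOURCE B (Python) =====
-- def build_presence_breakdown(coverage_map):
--     concepts = [c for article in coverage_map.get("articles", [])
--                   for c in article.get("concepts", [])]
--     total = len(concepts)
--     t = sum(1 for c in concepts if c.get("in_textbooks"))
--     e = sum(1 for c in concepts if c.get("in_external"))
--     both = sum(1 for c in concepts
--                if c.get("in_textbooks") and c.get("in_external"))
--     return {
--         "textbooks_and_external": both,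
--         "textbooks_only": t - both,
--         "external_only": e - both,
--         "absent_from_both": total - t - e + both,
--     }
-- ===== Notes on version B (the rewrite author's own statement) =====
-- stated objective: alternative
-- what changed: B never classifies a concept into a category: it flattens the concepts once, counts three marginals (in_textbooks, in_external, both) plus the total, and derives the four categories by inclusion-exclusion arithmetic (textbooks_only = t - both, absent = total - t - e + both), replacing A's per-concept four-way branch and mutable counter dict.
import Mathlib
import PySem

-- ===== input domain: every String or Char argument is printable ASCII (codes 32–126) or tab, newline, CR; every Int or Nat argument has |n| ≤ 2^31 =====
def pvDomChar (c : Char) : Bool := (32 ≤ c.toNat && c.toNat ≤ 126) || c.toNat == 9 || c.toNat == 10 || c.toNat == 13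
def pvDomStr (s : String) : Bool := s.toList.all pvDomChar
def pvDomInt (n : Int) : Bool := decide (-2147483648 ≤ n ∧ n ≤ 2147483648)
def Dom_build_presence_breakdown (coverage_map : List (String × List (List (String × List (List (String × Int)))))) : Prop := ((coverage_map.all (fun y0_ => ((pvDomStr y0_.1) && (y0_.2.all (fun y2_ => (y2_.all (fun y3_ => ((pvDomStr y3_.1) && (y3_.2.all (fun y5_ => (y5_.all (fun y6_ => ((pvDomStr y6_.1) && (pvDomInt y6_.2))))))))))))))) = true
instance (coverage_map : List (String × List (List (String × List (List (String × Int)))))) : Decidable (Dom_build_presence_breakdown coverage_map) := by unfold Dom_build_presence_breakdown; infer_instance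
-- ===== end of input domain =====

-- B replaces A's per-concept four-way branch by inclusion-exclusion over marginal counts
-- (textbooks, external, both, total) computed on the flattened concept list (objective: alternative, same cost).


-- ===== PORT A =====
-- counts starts as the literal four-key dict; the nested loop bumps one key per concept via the
-- if/elif chain; the function returns the dict (its items, in insertion order).
-- bool(concept.get(k)) : a get miss gives None (falsy), so it equals "first value at k, default 0, ≠ 0".
def build_presence_breakdown (coverage_map : List (String × List (List (String × List (List (String × Int)))))) : List (String × Int) :=
  (((PySem.Dict.mk coverage_map).getD "articles" []).foldl (fun (counts : PySem.Dict String Int) article =>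
    ((PySem.Dict.mk article).getD "concepts" []).foldl (fun counts concept =>
      let in_textbooks : Bool := decide (((PySem.Dict.mk concept).getD "in_textbooks" 0) ≠ 0)
      let in_external : Bool := decide (((PySem.Dict.mk concept).getD "in_external" 0) ≠ 0)
      if in_textbooks && in_external then
        counts.insert "textbooks_and_external" (counts.getD "textbooks_and_external" 0 + 1)
      else if in_textbooks then
        counts.insert "textbooks_only" (counts.getD "textbooks_only" 0 + 1)
      else if in_external then
        counts.insert "external_only" (counts.getD "external_only" 0 + 1)
      else
        counts.insert "absent_from_both" (counts.getD "absent_from_both" 0 + 1)) counts)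
    (PySem.Dict.mk [("textbooks_and_external", 0), ("textbooks_only", 0), ("external_only", 0), ("absent_from_both", 0)])).items

-- ===== PORT B =====
-- Source B: flatten the concepts once, take the total and the three marginal counts
-- (truthiness of an int value = ≠ 0; a get miss is falsy), then derive the four
-- categories by inclusion-exclusion.
def build_presence_breakdown_alt (coverage_map : List (String × List (List (String × List (List (String × Int)))))) : List (String × Int) :=
  let concepts := ((PySem.Dict.mk coverage_map).getD "articles" []).flatMap
    (fun article => (PySem.Dict.mk article).getD "concepts" [])
  let total : Int := concepts.length
  let t : Int := concepts.countP (fun c => decide (((PySem.Dict.mk c).getD "in_textbooks" 0) ≠ 0))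
  let e : Int := concepts.countP (fun c => decide (((PySem.Dict.mk c).getD "in_external" 0) ≠ 0))
  let both : Int := concepts.countP (fun c =>
    decide (((PySem.Dict.mk c).getD "in_textbooks" 0) ≠ 0) &&
    decide (((PySem.Dict.mk c).getD "in_external" 0) ≠ 0))
  [("textbooks_and_external", both),
   ("textbooks_only", t - both),
   ("external_only", e - both),
   ("absent_from_both", total - t - e + both)]

-- ===== PRECONDITION & SPEC =====
def Spec_build_presence_breakdown (coverage_map : List (String × List (List (String × List (List (String × Int)))))) (out : List (String × Int)) : Prop := out = build_presence_breakdown_alt coverage_map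
instance (coverage_map : List (String × List (List (String × List (List (String × Int)))))) (out : List (String × Int)) : Decidable (Spec_build_presence_breakdown coverage_map out) := by unfold Spec_build_presence_breakdown; infer_instance

-- ===== CLAIM (what is proved, stated in full; the proofs are below) =====
def Claim_equal_build_presence_breakdown : Prop := ∀ (coverage_map : List (String × List (List (String × List (List (String × Int)))))), Dom_build_presence_breakdown coverage_map → Spec_build_presence_breakdown coverage_map (build_presence_breakdown coverage_map)

-- ===== LEMMAS AND PROOFS =====

-- truthiness of the two flags of a concept
def pvTB (c : List (String × Int)) : Bool := decide (((PySem.Dict.mk c).getD "in_textbooks" 0) ≠ 0)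
def pvEX (c : List (String × Int)) : Bool := decide (((PySem.Dict.mk c).getD "in_external" 0) ≠ 0)

-- A's counting loop, run over the flattened concept list, ends with the four exact
-- category counts added to the seed values
theorem pvA_fold (L : List (List (String × Int))) (a b c d : Int) :
    L.foldl (fun counts concept =>
      let in_textbooks : Bool := decide (((PySem.Dict.mk concept).getD "in_textbooks" 0) ≠ 0)
      let in_external : Bool := decide (((PySem.Dict.mk concept).getD "in_external" 0) ≠ 0)
      if in_textbooks && in_external then
        counts.insert "textbooks_and_external" (counts.getD "textbooks_and_external" 0 + 1)
      else if in_textbooks then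
        counts.insert "textbooks_only" (counts.getD "textbooks_only" 0 + 1)
      else if in_external then
        counts.insert "external_only" (counts.getD "external_only" 0 + 1)
      else
        counts.insert "absent_from_both" (counts.getD "absent_from_both" 0 + 1))
      (PySem.Dict.mk [("textbooks_and_external", a), ("textbooks_only", b), ("external_only", c), ("absent_from_both", d)])
    = PySem.Dict.mk [("textbooks_and_external", a + (L.countP (fun x => pvTB x && pvEX x) : Int)),
                     ("textbooks_only", b + (L.countP (fun x => pvTB x && !pvEX x) : Int)),
                     ("external_only", c + (L.countP (fun x => !pvTB x && pvEX x) : Int)),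
                     ("absent_from_both", d + (L.countP (fun x => !pvTB x && !pvEX x) : Int))] := by
  induction L generalizing a b c d with
  | nil => simp
  | cons x t ih =>
    rcases hbt : decide (((PySem.Dict.mk x).getD "in_textbooks" 0) ≠ 0) with _ | _ <;>
    rcases hbe : decide (((PySem.Dict.mk x).getD "in_external" 0) ≠ 0) with _ | _ <;>
      simp only [List.foldl_cons, hbt, hbe, Bool.and_self, Bool.false_and, Bool.true_and, if_true]
    · show List.foldl _ (PySem.Dict.mk [("textbooks_and_external", a), ("textbooks_only", b), ("external_only", c), ("absent_from_both", d + 1)]) t = _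
      rw [ih]
      have h1 : pvTB x = false := hbt
      have h2 : pvEX x = false := hbe
      simp [h1, h2]; ring
    · show List.foldl _ (PySem.Dict.mk [("textbooks_and_external", a), ("textbooks_only", b), ("external_only", c + 1), ("absent_from_both", d)]) t = _
      rw [ih]
      have h1 : pvTB x = false := hbt
      have h2 : pvEX x = true := hbe
      simp [h1, h2]; ring
    · show List.foldl _ (PySem.Dict.mk [("textbooks_and_external", a), ("textbooks_only", b + 1), ("external_only", c), ("absent_from_both", d)]) t = _
      rw [ih]
      have h1 : pvTB x = true := hbt
      have h2 : pvEX x = false := hbe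
      simp [h1, h2]; ring
    · show List.foldl _ (PySem.Dict.mk [("textbooks_and_external", a + 1), ("textbooks_only", b), ("external_only", c), ("absent_from_both", d)]) t = _
      rw [ih]
      have h1 : pvTB x = true := hbt
      have h2 : pvEX x = true := hbe
      simp [h1, h2]; ring

-- a marginal count splits over the other flag
theorem pv_countP_split (L : List (List (String × Int))) (p q : List (String × Int) → Bool) :
    L.countP p = L.countP (fun x => p x && q x) + L.countP (fun x => p x && !q x) := by
  induction L with
  | nil => simp
  | cons x t ih => cases hp : p x <;> cases hq : q x <;> simp [hp, hq, ih] <;> omega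

-- total = count of any predicate plus count of its negation
theorem pv_countP_total (L : List (List (String × Int))) (p : List (String × Int) → Bool) :
    L.length = L.countP p + L.countP (fun x => !p x) := by
  induction L with
  | nil => simp
  | cons x t ih => cases hp : p x <;> simp [hp, ih] <;> omega

-- the two programs agree: A's four category counts are exactly B's inclusion-exclusion values
theorem pv_eq_alt (cm : List (String × List (List (String × List (List (String × Int)))))) :
    build_presence_breakdown cm = build_presence_breakdown_alt cm := by
  unfold build_presence_breakdown build_presence_breakdown_alt
  rw [← List.foldl_flatMap, pvA_fold]
  set L := ((PySem.Dict.mk cm).getD "articles" []).flatMap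
    (fun article => (PySem.Dict.mk article).getD "concepts" []) with hL
  have h1 : L.countP pvTB = L.countP (fun x => pvTB x && pvEX x) + L.countP (fun x => pvTB x && !pvEX x) :=
    pv_countP_split L pvTB pvEX
  have h2 : L.countP pvEX = L.countP (fun x => pvTB x && pvEX x) + L.countP (fun x => !pvTB x && pvEX x) := by
    rw [pv_countP_split L pvEX pvTB]
    congr 1 <;> [skip; skip] <;> exact List.countP_congr (fun x _ => by cases pvTB x <;> cases pvEX x <;> rfl)
  have h3 : L.length = L.countP pvTB + L.countP (fun x => !pvTB x) := pv_countP_total L pvTB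
  have h4 : L.countP (fun x => !pvTB x) = L.countP (fun x => !pvTB x && pvEX x) + L.countP (fun x => !pvTB x && !pvEX x) :=
    pv_countP_split L (fun x => !pvTB x) pvEX
  have e1 : (fun c : List (String × Int) => decide (((PySem.Dict.mk c).getD "in_textbooks" 0) ≠ 0)) = pvTB := rfl
  have e2 : (fun c : List (String × Int) => decide (((PySem.Dict.mk c).getD "in_external" 0) ≠ 0)) = pvEX := rfl
  have e3 : (fun c : List (String × Int) =>
      decide (((PySem.Dict.mk c).getD "in_textbooks" 0) ≠ 0) &&
      decide (((PySem.Dict.mk c).getD "in_external" 0) ≠ 0)) = (fun x => pvTB x && pvEX x) := rfl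
  rw [e1, e2, e3]
  simp only [List.cons.injEq, Prod.mk.injEq, true_and, and_true]
  refine ⟨?_, ?_, ?_, ?_⟩ <;> omega

-- ===== VERDICT (by name: the statement is the Claim_ definition above) =====
theorem build_presence_breakdown_spec : Claim_equal_build_presence_breakdown := by
  intro cm _
  unfold Spec_build_presence_breakdown
  exact pv_eq_alt cm
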